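-- pv_equiv track=rewrite | github.com/JuniorDevNam/Python | Lớp 12/BÀI TOÁN/Câu 12.py | duong_max_ptu
-- ===== SOURCE A (Python) =====
-- def duong_max_ptu(a):
--     tong = 0
--     temp = 0
--     so_lg = 0
--     temp2 = 0
--     for x in range(len(a)):
--         if a[x] > 0:
--             temp += a[x]
--             temp2 += 1
--         if a[x] < 0:
--             if temp > tong:
--                 tong -= tong
--                 tong += temp
--                 so_lg -= so_lg
--                 so_lg += temp2
--             temp -= temp
--             temp2 -= temp2
--     return so_lg
-- ===== SOURCE B (Python) =====
-- def duong_max_ptu(a):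
--     # Split on negatives into segments; the trailing segment (after the last
--     # negative, or the whole list if no negative) is never a candidate.
--     segs = []
--     cur = []
--     for x in a:
--         if x < 0:
--             segs.append(cur)
--             cur = []
--         else:
--             cur.append(x)
--     best_sum = 0
--     best_cnt = 0
--     for seg in segs:
--         s = sum(v for v in seg if v > 0)
--         c = sum(1 for v in seg if v > 0)
--         if s > best_sum:
--             best_sum, best_cnt = s, c
--     return best_cnt
-- ===== Notes on version B (the rewrite author's own statement) =====
-- stated objective: alternative
-- what changed: Replaces the single stateful index-loop over four mutable counters with a build-segments-then-scan decomposition: split the list on negatives into completed segments (dropping the trailing run), then scan the segments for the earliest one with strictly largest positive-sum and return its positive count.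
import Mathlib
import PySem

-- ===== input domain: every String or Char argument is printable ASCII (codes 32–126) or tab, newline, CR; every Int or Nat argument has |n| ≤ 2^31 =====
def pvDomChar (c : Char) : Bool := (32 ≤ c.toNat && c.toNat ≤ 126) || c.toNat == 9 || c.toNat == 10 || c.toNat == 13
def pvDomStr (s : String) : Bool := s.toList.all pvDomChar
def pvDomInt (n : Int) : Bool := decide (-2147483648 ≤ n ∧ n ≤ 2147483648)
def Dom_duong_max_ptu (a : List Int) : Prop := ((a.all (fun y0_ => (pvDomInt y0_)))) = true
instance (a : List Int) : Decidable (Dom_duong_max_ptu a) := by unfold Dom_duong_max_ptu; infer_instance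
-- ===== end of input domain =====

-- B replaces A's single stateful four-counter index loop with a split-on-negatives-then-scan-segments
-- decomposition (objective: alternative; same cost).

-- ===== PORT A =====
-- the body of A's for-loop, on state (tong, temp, so_lg, temp2)
def duongStepA (s : Int × Int × Int × Int) (v : Int) : Int × Int × Int × Int :=
  let tong := s.1
  let temp := if v > 0 then s.2.1 + v else s.2.1
  let temp2 := if v > 0 then s.2.2.2 + 1 else s.2.2.2
  if v < 0 then
    if temp > tong then (temp, 0, temp2, 0) else (tong, 0, s.2.2.1, 0)
  else (tong, temp, s.2.2.1, temp2)

def duong_max_ptu (a : List Int) : Int :=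
  ((PySem.List.pyRange 0 (a.length : Int) 1).foldl
      (fun s x => duongStepA s (PySem.List.pyGetD a x 0)) (0, 0, 0, 0)).2.2.1

-- ===== PORT B =====
-- split on negatives; st.1 = completed segments, st.2 = current run (dropped at the end)
def duongSegs (a : List Int) : List (List Int) × List Int :=
  a.foldl (fun (st : List (List Int) × List Int) x =>
      if x < 0 then (st.1 ++ [st.2], []) else (st.1, st.2 ++ [x])) ([], [])

def duong_max_ptu_alt (a : List Int) : Int :=
  ((duongSegs a).1.foldl (fun (b : Int × Int) seg =>
      let s := (seg.filter (fun v => v > 0)).sum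
      let c := ((seg.filter (fun v => v > 0)).length : Int)
      if s > b.1 then (s, c) else b) (0, 0)).2

-- ===== PRECONDITION & SPEC =====
def Spec_duong_max_ptu (a : List Int) (out : Int) : Prop := out = duong_max_ptu_alt a
instance (a : List Int) (out : Int) : Decidable (Spec_duong_max_ptu a out) := by unfold Spec_duong_max_ptu; infer_instance

-- ===== CLAIM (what is proved, stated in full; the proofs are below) =====
def Claim_equal_duong_max_ptu : Prop := ∀ (a : List Int), Dom_duong_max_ptu a → Spec_duong_max_ptu a (duong_max_ptu a)

-- ===== LEMMAS AND PROOFS =====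

def possum (l : List Int) : Int := (l.filter (fun v => v > 0)).sum
def poscnt (l : List Int) : Int := ((l.filter (fun v => v > 0)).length : Int)

-- segments B completes, starting from current run cur
def goSegs : List Int → List Int → List (List Int)
  | [], _ => []
  | x :: xs, cur => if x < 0 then cur :: goSegs xs [] else goSegs xs (cur ++ [x])

-- the trailing (dropped) run
def trailRun : List Int → List Int → List Int
  | [], cur => cur
  | x :: xs, cur => if x < 0 then trailRun xs [] else trailRun xs (cur ++ [x])

def bStep (b : Int × Int) (seg : List Int) : Int × Int :=
  if possum seg > b.1 then (possum seg, poscnt seg) else b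

def bFold (b : Int × Int) (segs : List (List Int)) : Int × Int := segs.foldl bStep b

theorem possum_append (l : List Int) (x : Int) :
    possum (l ++ [x]) = possum l + if x > 0 then x else 0 := by
  by_cases h : x > 0 <;> simp [possum, List.filter_append, h]

theorem poscnt_append (l : List Int) (x : Int) :
    poscnt (l ++ [x]) = poscnt l + if x > 0 then 1 else 0 := by
  by_cases h : x > 0 <;> simp [poscnt, List.filter_append, h]

theorem segs_fst (a : List Int) : ∀ (segs : List (List Int)) (cur : List Int),
    (a.foldl (fun (st : List (List Int) × List Int) x =>
        if x < 0 then (st.1 ++ [st.2], []) else (st.1, st.2 ++ [x])) (segs, cur)).1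
      = segs ++ goSegs a cur := by
  induction a with
  | nil => intro segs cur; simp [goSegs]
  | cons x xs ih =>
    intro segs cur
    by_cases hx : x < 0
    · simp only [List.foldl_cons, goSegs, if_pos hx]
      rw [ih (segs ++ [cur]) []]; simp
    · simp only [List.foldl_cons, goSegs, if_neg hx]
      exact ih segs (cur ++ [x])

theorem main_inv (a : List Int) : ∀ (cur : List Int) (tong so : Int),
    a.foldl duongStepA (tong, possum cur, so, poscnt cur)
      = ((bFold (tong, so) (goSegs a cur)).1, possum (trailRun a cur),
         (bFold (tong, so) (goSegs a cur)).2, poscnt (trailRun a cur)) := by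
  induction a with
  | nil => intro cur tong so; simp [bFold, goSegs, trailRun]
  | cons x xs ih =>
    intro cur tong so
    by_cases hx : x < 0
    · have hxp : ¬ x > 0 := by omega
      simp only [List.foldl_cons, goSegs, trailRun, if_pos hx]
      have hstep : duongStepA (tong, possum cur, so, poscnt cur) x
          = ((bStep (tong, so) cur).1, possum ([] : List Int),
             (bStep (tong, so) cur).2, poscnt ([] : List Int)) := by
        simp only [duongStepA, bStep, if_pos hx, if_neg hxp]
        split_ifs <;> simp [possum, poscnt]
      rw [hstep]
      rw [ih [] (bStep (tong, so) cur).1 (bStep (tong, so) cur).2]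
      simp [bFold]
    · simp only [List.foldl_cons, goSegs, trailRun, if_neg hx]
      have hstep : duongStepA (tong, possum cur, so, poscnt cur) x
          = (tong, possum (cur ++ [x]), so, poscnt (cur ++ [x])) := by
        simp only [duongStepA, if_neg hx, possum_append, poscnt_append]
        split_ifs <;> simp
      rw [hstep, ih (cur ++ [x]) tong so]

theorem alt_eq (a : List Int) : duong_max_ptu_alt a = (bFold (0, 0) (goSegs a [])).2 := by
  unfold duong_max_ptu_alt duongSegs bFold
  rw [segs_fst a [] []]
  simp only [List.nil_append]
  rfl

-- ===== VERDICT (by name: the statement is the Claim_ definition above) =====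
theorem duong_max_ptu_spec : Claim_equal_duong_max_ptu := by
  intro a _
  show duong_max_ptu a = duong_max_ptu_alt a
  unfold duong_max_ptu
  rw [PySem.List.foldl_pyRange_zero_pyGetD' a 0 duongStepA (0, 0, 0, 0)]
  rw [alt_eq]
  have := main_inv a [] 0 0
  simp only [possum, poscnt, List.filter_nil, List.sum_nil, List.length_nil, Nat.cast_zero] at this
  rw [this]
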